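-- pv_equiv track=rewrite | github.com/htoyll8/D-Caps | main2.py | createClickableSketch2
-- ===== SOURCE A (Python) =====
-- def createClickableSketch2(host, version, sketch_id, sketch, hold_idx):
--     hole_counter = 0
--     updated_sketch = "<td>"
--     # Store the indices of the holes in the sketch.
--     for ch in sketch:
--         if(ch == '?'):
--             if (hole_counter == hold_idx):
--                 updated_sketch += f'</td><td><a class="selected-hole" href="{host}/oversynth/api/{version}/sketches/{sketch_id}/{hole_counter}">?</a></td><td>'
--             else:
--                 updated_sketch += f'<a href="{host}/oversynth/api/v1.0/sketches/{sketch_id}/{hole_counter}">?</a>'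
--             hole_counter += 1
--         else:
--             updated_sketch += ch
--     updated_sketch += "</td><td></td>"
--     return updated_sketch
-- ===== SOURCE B (Python) =====
-- def createClickableSketch2(host, version, sketch_id, sketch, hold_idx):
--     # Split-then-interleave: segments between '?' holes, hole i sits at joint i.
--     segs = sketch.split('?')
--     def hole(i):
--         if i == hold_idx:
--             return f'</td><td><a class="selected-hole" href="{host}/oversynth/api/{version}/sketches/{sketch_id}/{i}">?</a></td><td>'
--         return f'<a href="{host}/oversynth/api/v1.0/sketches/{sketch_id}/{i}">?</a>'
--     out = "<td>" + segs[0]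
--     for i, seg in enumerate(segs[1:]):
--         out += hole(i) + seg
--     return out + "</td><td></td>"
-- ===== Notes on version B (the rewrite author's own statement) =====
-- stated objective: alternative
-- what changed: Replaces the per-character scan with its branch-incremented hole counter by splitting the sketch on '?' once and interleaving the segments with hole HTML indexed by joint position.
import Mathlib
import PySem

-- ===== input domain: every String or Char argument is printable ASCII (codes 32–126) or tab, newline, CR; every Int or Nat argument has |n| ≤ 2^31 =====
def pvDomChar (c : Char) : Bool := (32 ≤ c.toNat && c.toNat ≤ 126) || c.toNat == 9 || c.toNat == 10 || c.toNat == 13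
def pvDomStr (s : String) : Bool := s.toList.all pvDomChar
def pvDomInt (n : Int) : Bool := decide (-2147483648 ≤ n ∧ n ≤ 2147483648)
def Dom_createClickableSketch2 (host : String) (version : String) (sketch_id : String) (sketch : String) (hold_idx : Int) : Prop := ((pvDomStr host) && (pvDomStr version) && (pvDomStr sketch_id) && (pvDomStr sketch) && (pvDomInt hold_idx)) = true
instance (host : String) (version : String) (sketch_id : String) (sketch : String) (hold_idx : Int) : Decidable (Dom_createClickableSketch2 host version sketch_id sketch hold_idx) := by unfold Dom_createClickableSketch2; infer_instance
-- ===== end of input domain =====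

-- B replaces A's per-character scan and counter by a split-on-'?' then interleave of segments with hole HTML (alternative decomposition, same cost).


-- shared literal templates (the f-strings of both Pythons), on List Char
def pvHole (host : String) (version : String) (sketch_id : String) (hold_idx : Int) (i : Int) : List Char :=
  if i = hold_idx then
    "</td><td><a class=\"selected-hole\" href=\"".toList ++ host.toList ++ "/oversynth/api/".toList
      ++ version.toList ++ "/sketches/".toList ++ sketch_id.toList ++ "/".toList
      ++ PySem.Int.toChars i ++ "\">?</a></td><td>".toList
  else
    "<a href=\"".toList ++ host.toList ++ "/oversynth/api/v1.0/sketches/".toList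
      ++ sketch_id.toList ++ "/".toList ++ PySem.Int.toChars i ++ "\">?</a>".toList

-- ===== PORT A =====
-- A's loop: left fold over the characters with state (hole_counter, updated_sketch)
def createClickableSketch2 (host : String) (version : String) (sketch_id : String) (sketch : String) (hold_idx : Int) : String :=
  String.ofList ((sketch.toList.foldl
    (fun (st : Int × List Char) ch =>
      if ch = '?' then (st.1 + 1, st.2 ++ pvHole host version sketch_id hold_idx st.1)
      else (st.1, st.2 ++ [ch]))
    (0, "<td>".toList)).2 ++ "</td><td></td>".toList)

-- ===== PORT B =====
-- hand port of str.split('?'): exact for a single-character separator (empty segments preserved)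
def pvSegs : List Char → List (List Char)
  | [] => [[]]
  | c :: t => if c = '?' then [] :: pvSegs t
              else match pvSegs t with
                   | [] => [[c]]
                   | s :: r => (c :: s) :: r

-- B's loop: for i, seg in enumerate(segs[1:]): out += hole(i) + seg
def pvJoints (host : String) (version : String) (sketch_id : String) (hold_idx : Int) : List (List Char) → Int → List Char
  | [], _ => []
  | s :: t, i => pvHole host version sketch_id hold_idx i ++ s ++ pvJoints host version sketch_id hold_idx t (i + 1)

def createClickableSketch2_alt (host : String) (version : String) (sketch_id : String) (sketch : String) (hold_idx : Int) : String :=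
  String.ofList ("<td>".toList ++ (pvSegs sketch.toList).headD []
    ++ pvJoints host version sketch_id hold_idx (pvSegs sketch.toList).tail 0
    ++ "</td><td></td>".toList)

-- ===== PRECONDITION & SPEC =====
def Spec_createClickableSketch2 (host : String) (version : String) (sketch_id : String) (sketch : String) (hold_idx : Int) (out : String) : Prop := out = createClickableSketch2_alt host version sketch_id sketch hold_idx
instance (host : String) (version : String) (sketch_id : String) (sketch : String) (hold_idx : Int) (out : String) : Decidable (Spec_createClickableSketch2 host version sketch_id sketch hold_idx out) := by unfold Spec_createClickableSketch2; infer_instance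

-- ===== CLAIM (what is proved, stated in full; the proofs are below) =====
def Claim_equal_createClickableSketch2 : Prop := ∀ (host : String) (version : String) (sketch_id : String) (sketch : String) (hold_idx : Int), Dom_createClickableSketch2 host version sketch_id sketch hold_idx → Spec_createClickableSketch2 host version sketch_id sketch hold_idx (createClickableSketch2 host version sketch_id sketch hold_idx)

-- ===== LEMMAS AND PROOFS =====

-- right-handed reading of A's loop body (proof device)
def pvLoopR (host : String) (version : String) (sketch_id : String) (hold_idx : Int) : List Char → Int → List Char
  | [], _ => []
  | ch :: t, c =>
    if ch = '?' then pvHole host version sketch_id hold_idx c ++ pvLoopR host version sketch_id hold_idx t (c + 1)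
    else ch :: pvLoopR host version sketch_id hold_idx t c

theorem pvFoldl_eq (host version sketch_id : String) (hold_idx : Int) :
    ∀ (l : List Char) (c : Int) (acc : List Char),
    (l.foldl (fun (st : Int × List Char) ch =>
        if ch = '?' then (st.1 + 1, st.2 ++ pvHole host version sketch_id hold_idx st.1)
        else (st.1, st.2 ++ [ch])) (c, acc)).2
      = acc ++ pvLoopR host version sketch_id hold_idx l c := by
  intro l
  induction l with
  | nil => intro c acc; simp [pvLoopR]
  | cons ch t ih =>
    intro c acc
    by_cases h : ch = '?' <;> simp [pvLoopR, h, ih, List.append_assoc]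

theorem pvSegs_ne_nil (l : List Char) : pvSegs l ≠ [] := by
  cases l with
  | nil => simp [pvSegs]
  | cons c t =>
    simp only [pvSegs]
    split
    · simp
    · cases h : pvSegs t <;> simp

theorem pvLoopR_eq_segs (host version sketch_id : String) (hold_idx : Int) :
    ∀ (l : List Char) (c : Int),
    pvLoopR host version sketch_id hold_idx l c
      = (pvSegs l).headD [] ++ pvJoints host version sketch_id hold_idx (pvSegs l).tail c := by
  intro l
  induction l with
  | nil => intro c; simp [pvLoopR, pvSegs, pvJoints]
  | cons ch t ih =>
    intro c
    by_cases h : ch = '?'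
    · cases hs : pvSegs t with
      | nil => exact absurd hs (pvSegs_ne_nil t)
      | cons s r =>
        have := ih (c + 1)
        rw [hs] at this
        simp only [pvLoopR, pvSegs, h, if_pos, List.tail_cons, List.headD_cons] at this ⊢
        rw [hs, this]
        simp [pvJoints, List.append_assoc]
    · cases hs : pvSegs t with
      | nil => exact absurd hs (pvSegs_ne_nil t)
      | cons s r =>
        have := ih c
        rw [hs] at this
        simp [pvLoopR, pvSegs, h, hs, this]

-- ===== VERDICT (by name: the statement is the Claim_ definition above) =====
theorem createClickableSketch2_spec : Claim_equal_createClickableSketch2 := by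
  intro host version sketch_id sketch hold_idx _
  unfold Spec_createClickableSketch2 createClickableSketch2 createClickableSketch2_alt
  rw [pvFoldl_eq, pvLoopR_eq_segs]
  simp [List.append_assoc]
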